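-- pv_equiv track=rewrite | github.com/aisspr/leetcode | GCA/q3.py | restaurantGuestList
-- ===== SOURCE A (Python) =====
-- def restaurantGuestList(orders):
--     from collections import Counter
--
--     dish_cnt = Counter()
--
--     for order in orders:
--         for dish, quantity in order:
--             dish_cnt[dish] += quantity
--     if not dish_cnt:
--         return []
--
--     max_quantity = max(dish_cnt.values())
--
--     result = [dish for dish, cnt in dish_cnt.items() if cnt == max_quantity]
--     result.sort()
--     return result
-- ===== SOURCE B (Python) =====
-- def restaurantGuestList(orders):
--     pairs = [p for order in orders for p in order]
--     if not pairs:
--         return []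
--
--     def total(d):
--         return sum(q for name, q in pairs if name == d)
--
--     best = max(total(name) for name, _ in pairs)
--     return sorted({name for name, _ in pairs if total(name) == best})
-- ===== Notes on version B (the rewrite author's own statement) =====
-- stated objective: alternative
-- what changed: Drops the Counter/dict entirely: B flattens the orders once and, for each pair, recomputes that dish's total by scanning all pairs (brute-force O(n^2) totals), takes the max of those per-pair totals, and returns the sorted set of names whose rescanned total equals it.
import Mathlib
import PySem

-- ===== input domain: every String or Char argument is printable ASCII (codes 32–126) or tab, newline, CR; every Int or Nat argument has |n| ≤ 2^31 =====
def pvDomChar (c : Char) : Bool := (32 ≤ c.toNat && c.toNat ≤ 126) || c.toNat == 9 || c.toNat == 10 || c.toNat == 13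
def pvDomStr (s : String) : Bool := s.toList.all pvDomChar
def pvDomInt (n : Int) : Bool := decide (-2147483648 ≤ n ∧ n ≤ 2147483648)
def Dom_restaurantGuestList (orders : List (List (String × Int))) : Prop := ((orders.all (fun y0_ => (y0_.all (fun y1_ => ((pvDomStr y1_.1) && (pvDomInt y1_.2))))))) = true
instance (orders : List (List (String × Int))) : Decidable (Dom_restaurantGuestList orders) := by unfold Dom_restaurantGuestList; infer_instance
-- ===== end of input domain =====

-- B drops the Counter entirely: it flattens the orders once, recomputes each dish's total
-- by a full scan of the flattened pairs (brute force, slower on big inputs), and returns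
-- the sorted set of names whose total equals the max; same return value as A.

-- ===== PORT A =====
def restaurantGuestList (orders : List (List (String × Int))) : List String :=
  let dish_cnt : PySem.Dict String Int :=
    orders.foldl (fun d order =>
      order.foldl (fun d dq => d.modify dq.1 0 (· + dq.2)) d) PySem.Dict.empty
  if dish_cnt.items = [] then []
  else
    match PySem.List.max? dish_cnt.values (fun v => v) with
    | none => []
    | some m =>
        PySem.List.sorted ((dish_cnt.items.filter (fun p => p.2 == m)).map (fun p => p.1))
          (fun s => s) false

-- ===== PORT B =====
-- B's helper `total(d)`: sum of the quantities of dish d over the flattened pairs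
def rgTotal (pairs : List (String × Int)) (d : String) : Int :=
  ((pairs.filter (fun p => p.1 == d)).map (fun p => p.2)).sum

def restaurantGuestList_alt (orders : List (List (String × Int))) : List String :=
  let pairs : List (String × Int) := orders.flatMap (fun order => order)
  if pairs = [] then []
  else
    match PySem.List.max? (pairs.map (fun p => rgTotal pairs p.1)) (fun v => v) with
    | none => []  -- unreachable: pairs ≠ []
    | some best =>
        PySem.List.sorted
          (PySem.Set.ofList ((pairs.filter (fun p => rgTotal pairs p.1 == best)).map (fun p => p.1)))
          (fun s => s) false

-- ===== PRECONDITION & SPEC =====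
def Spec_restaurantGuestList (orders : List (List (String × Int))) (out : List String) : Prop := out = restaurantGuestList_alt orders
instance (orders : List (List (String × Int))) (out : List String) : Decidable (Spec_restaurantGuestList orders out) := by unfold Spec_restaurantGuestList; infer_instance

-- ===== CLAIM (what is proved, stated in full; the proofs are below) =====
def Claim_equal_restaurantGuestList : Prop := ∀ (orders : List (List (String × Int))), Dom_restaurantGuestList orders → Spec_restaurantGuestList orders (restaurantGuestList orders)

-- ===== LEMMAS AND PROOFS =====

-- the counting dict's value at k is B's brute-force total
theorem rgGetD (l : List (String × Int)) (d : PySem.Dict String Int) (k : String) :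
    (l.foldl (fun d p => d.modify p.1 0 (· + p.2)) d).getD k 0 = d.getD k 0 + rgTotal l k := by
  induction l generalizing d with
  | nil => simp [rgTotal]
  | cons p t ih =>
    simp only [List.foldl_cons, ih, rgTotal, List.filter_cons]
    rw [PySem.Dict.getD_modify]
    by_cases h : k = p.1
    · simp [h]; ring
    · have h' : ¬ (p.1 == k) = true := by simpa using fun he => h he.symm
      simp [h, h']

-- max over a list of Ints (identity key) depends only on membership
theorem rgMaxCongr (xs ys : List Int) (h : ∀ x, x ∈ xs ↔ x ∈ ys) :
    PySem.List.max? xs (fun v => v) = PySem.List.max? ys (fun v => v) := by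
  cases hx : PySem.List.max? xs (fun v => v) with
  | none =>
    have : xs = [] := (PySem.List.max?_eq_none_iff _ _).mp hx
    have hys : ys = [] := by
      cases ys with
      | nil => rfl
      | cons y t => exact absurd ((h y).mpr (by simp)) (by simp [this])
    rw [hys]
    exact ((PySem.List.max?_eq_none_iff _ _).mpr rfl).symm
  | some m =>
    cases hy : PySem.List.max? ys (fun v => v) with
    | none =>
      have hy' : ys = [] := (PySem.List.max?_eq_none_iff _ _).mp hy
      have hm : m ∈ xs := PySem.List.max?_mem hx
      exact absurd ((h m).mp hm) (by simp [hy'])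
    | some m' =>
      have h1 : m ≤ m' := PySem.List.max?_isMax hy m ((h m).mp (PySem.List.max?_mem hx))
      have h2 : m' ≤ m := PySem.List.max?_isMax hx m' ((h m').mpr (PySem.List.max?_mem hy))
      exact congrArg some (le_antisymm h1 h2)

-- ===== VERDICT (by name: the statement is the Claim_ definition above) =====
theorem restaurantGuestList_spec : Claim_equal_restaurantGuestList := by
  intro orders _
  unfold Spec_restaurantGuestList restaurantGuestList restaurantGuestList_alt
  set pairs : List (String × Int) := orders.flatMap (fun order => order) with hpairs
  -- A's double loop over orders is the single loop over the flattened pairs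
  have hfold :
      orders.foldl (fun d order =>
        order.foldl (fun d dq => d.modify dq.1 0 (· + dq.2)) d) PySem.Dict.empty
      = pairs.foldl (fun d p => d.modify p.1 0 (· + p.2)) PySem.Dict.empty := by
    rw [hpairs, List.flatMap_def, List.foldl_flatten, List.foldl_map]
  set dcnt := pairs.foldl (fun d p => d.modify p.1 0 (· + p.2)) PySem.Dict.empty with hd
  rw [hfold]
  have hkeys : dcnt.keys = PySem.Set.ofList (pairs.map (fun p => p.1)) := by
    rw [hd, PySem.Dict.keys_foldl_modify_key]
    simp [PySem.Set.update, PySem.Set.ofList_eq_foldl, PySem.Dict.keys_empty]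
  have hnd : dcnt.keys.Nodup := hkeys ▸ PySem.Set.nodup_ofList _
  have hgetD : ∀ k, dcnt.getD k 0 = rgTotal pairs k := by
    intro k; rw [hd, rgGetD]; simp [PySem.Dict.getD_empty]
  by_cases hnil : pairs = []
  · have hkeysnil : dcnt.keys = [] := by simp [hkeys, hnil, PySem.Set.ofList]
    have : dcnt.items = [] := by
      have := hkeysnil
      simpa [PySem.Dict.keys, List.map_eq_nil_iff] using this
    simp [this, hnil]
  · -- both branches are in the nonempty case
    have hitems : dcnt.items ≠ [] := by
      intro h
      have : dcnt.keys = [] := by simp [PySem.Dict.keys, h]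
      rw [hkeys] at this
      rcases List.exists_mem_of_ne_nil _ hnil with ⟨p, hp⟩
      have : p.1 ∈ PySem.Set.ofList (pairs.map (fun q => q.1)) := by
        rw [PySem.Set.mem_ofList]; exact List.mem_map_of_mem hp
      simp_all
    rw [if_neg hitems, if_neg hnil]
    -- the two maxima agree
    have hvals : dcnt.values = dcnt.keys.map (fun k => dcnt.getD k 0) :=
      PySem.Dict.values_eq_map_keys dcnt hnd 0
    have hmax : PySem.List.max? dcnt.values (fun v => v)
        = PySem.List.max? (pairs.map (fun p => rgTotal pairs p.1)) (fun v => v) := by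
      apply rgMaxCongr
      intro x
      constructor
      · intro hx
        rw [hvals, hkeys] at hx
        rcases List.mem_map.mp hx with ⟨k, hk, hkx⟩
        rw [PySem.Set.mem_ofList] at hk
        rcases List.mem_map.mp hk with ⟨p, hp, hpk⟩
        exact List.mem_map.mpr ⟨p, hp, by rw [hpk]; rw [← hkx, hgetD k]⟩
      · intro hx
        rcases List.mem_map.mp hx with ⟨p, hp, hpx⟩
        rw [hvals, hkeys]
        refine List.mem_map.mpr ⟨p.1, ?_, by rw [hgetD, hpx]⟩
        rw [PySem.Set.mem_ofList]; exact List.mem_map_of_mem hp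
    rw [hmax]
    cases hm : PySem.List.max? (pairs.map (fun p => rgTotal pairs p.1)) (fun v => v) with
    | none =>
      exact absurd ((PySem.List.max?_eq_none_iff _ _).mp hm) (by simp [hnil])
    | some m =>
      -- the two selected name lists are nodup permutations of each other; both sides sort them
      apply PySem.List.sorted_eq_sorted_of_perm _ _ _ (fun a b h => h)
      rw [List.perm_ext_iff_of_nodup]
      · intro k
        have hA : k ∈ (dcnt.items.filter (fun p => p.2 == m)).map (fun p => p.1)
            ↔ k ∈ pairs.map (fun p => p.1) ∧ rgTotal pairs k = m := by
          rw [PySem.Dict.items_eq_map_keys dcnt hnd 0]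
          constructor
          · intro hk
            rcases List.mem_map.mp hk with ⟨q, hq, hq1⟩
            rcases List.mem_filter.mp hq with ⟨hq2, hq3⟩
            rcases List.mem_map.mp hq2 with ⟨k', hk', hk'q⟩
            rw [← hk'q] at hq1 hq3
            simp only at hq1 hq3
            subst hq1
            rw [hkeys, PySem.Set.mem_ofList] at hk'
            exact ⟨hk', by simpa [hgetD] using hq3⟩
          · intro ⟨hk1, hk2⟩
            refine List.mem_map.mpr ⟨(k, dcnt.getD k 0), List.mem_filter.mpr ⟨?_, ?_⟩, rfl⟩
            · exact List.mem_map.mpr ⟨k, by rw [hkeys, PySem.Set.mem_ofList]; exact hk1, rfl⟩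
            · simpa [hgetD] using hk2
        have hB : k ∈ PySem.Set.ofList
              ((pairs.filter (fun p => rgTotal pairs p.1 == m)).map (fun p => p.1))
            ↔ k ∈ pairs.map (fun p => p.1) ∧ rgTotal pairs k = m := by
          rw [PySem.Set.mem_ofList]
          constructor
          · intro hk
            rcases List.mem_map.mp hk with ⟨p, hp, hp1⟩
            rcases List.mem_filter.mp hp with ⟨hp2, hp3⟩
            rw [← hp1]
            exact ⟨List.mem_map_of_mem hp2, by simpa using hp3⟩
          · intro ⟨hk1, hk2⟩
            rcases List.mem_map.mp hk1 with ⟨p, hp, hp1⟩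
            refine List.mem_map.mpr ⟨p, List.mem_filter.mpr ⟨hp, ?_⟩, hp1⟩
            simp [hp1, hk2]
        rw [hA, hB]
      · -- A's selection is a sublist of the nodup keys list
        have hsub : List.Sublist ((dcnt.items.filter (fun p => p.2 == m)).map (fun p => p.1))
            (dcnt.items.map (fun p => p.1)) :=
          List.filter_sublist.map _
        exact hsub.nodup hnd
      · exact PySem.Set.nodup_ofList _
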